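-- pv_equiv track=rewrite | github.com/louzounlab-microbiome/microbiome | LearningMethods/general_functions.py | shorten_bact_names
-- ===== SOURCE A (Python) =====
-- def pop_idx(idx, objects_to_remove_idx_from):
--     idx.reverse()
--     for obj in objects_to_remove_idx_from:
--         for i in idx:
--             obj.pop(i)
--     return objects_to_remove_idx_from
--
-- def shorten_bact_names(bacterias):
--     # extract the last meaningful name - long multi level names to the lowest level definition
--     short_bacterias_names = []
--     for f in bacterias:
--         i = 1
--         while len(f.split(";")[-i]) < 5 or f.split(";")[-i] in ['Unassigned', 'NA']:  # meaningless name
--             i += 1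
--             if i > len(f.split(";")):
--                 i -= 1
--                 break
--         short_bacterias_names.append(f.split(";")[-i].strip(" "))
--     # remove "k_bacteria" and "Unassigned" samples - irrelevant
--     k_bact_idx = []
--     for i, bact in enumerate(short_bacterias_names):
--         if bact == 'k__Bacteria' or bact == 'Unassigned':
--             k_bact_idx.append(i)
--
--     if k_bact_idx:
--         [short_bacterias_names, bacterias] = pop_idx(k_bact_idx, [short_bacterias_names, bacterias])
--
--     return short_bacterias_names, bacterias
-- ===== SOURCE B (Python) =====
-- def shorten_bact_names(bacterias):
--     # One pass: pick the lowest meaningful level per name, drop irrelevant ones.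
--     short, bact = [], []
--     for f in bacterias:
--         parts = f.split(";")
--         name = next((p for p in reversed(parts)
--                      if len(p) >= 5 and p not in ('Unassigned', 'NA')), parts[0])
--         name = name.strip(" ")
--         if name == 'k__Bacteria' or name == 'Unassigned':
--             continue
--         short.append(name)
--         bact.append(f)
--     if len(bact) != len(bacterias):
--         bacterias[:] = bact   # replicate A's in-place removal
--     return short, bacterias
-- ===== Notes on version B (the rewrite author's own statement) =====
-- stated objective: simpler
-- what changed: Single pass per element: a reversed-scan `next(...)` picks the lowest meaningful level instead of A's re-splitting while-loop, and dropped entries are simply never appended, replacing A's index-collection plus reverse-pop phase; mutation of the input list is kept via one slice assignment.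
import Mathlib
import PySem

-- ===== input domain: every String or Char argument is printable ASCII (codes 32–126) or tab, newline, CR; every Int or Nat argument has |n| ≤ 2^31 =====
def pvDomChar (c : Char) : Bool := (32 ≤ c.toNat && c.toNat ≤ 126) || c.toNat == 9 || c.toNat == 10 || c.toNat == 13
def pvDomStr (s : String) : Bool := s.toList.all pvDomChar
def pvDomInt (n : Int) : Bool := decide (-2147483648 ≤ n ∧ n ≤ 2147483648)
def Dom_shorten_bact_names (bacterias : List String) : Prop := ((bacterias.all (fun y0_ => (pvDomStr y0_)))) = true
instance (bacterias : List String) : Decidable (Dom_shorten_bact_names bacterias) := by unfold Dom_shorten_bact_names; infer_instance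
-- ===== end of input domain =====

-- B replaces A's re-splitting while-loop and index-collect-then-reverse-pop phase by one pass
-- that scans each split from the tail and never appends dropped entries (objective: simpler).
-- A mutates its argument in place (pop); the equivalence proved here is about the RETURN value
-- (B's Python replicates the mutation via one slice assignment).

-- ===== PORT A =====
-- `f.split(";")[-i]` (always in range where A evaluates it; the getD "" default is never taken there)
def pvPartAt (parts : List String) (i : Nat) : String :=
  (PySem.List.pyGet? parts (-(i : Int))).getD ""

-- A's `while` loop: returns the final value of `i`
def pvLoopA (parts : List String) (i : Nat) : Nat :=
  if PySem.Str.len (pvPartAt parts i) < 5 ∨ pvPartAt parts i ∈ ["Unassigned", "NA"] then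
    if i + 1 > parts.length then (i + 1) - 1
    else pvLoopA parts (i + 1)
  else i
termination_by parts.length + 1 - i
decreasing_by omega

-- `obj.pop(i)`: keep the remainder; none (IndexError) is unreachable in A
def pvPopStep (obj : List String) (i : Int) : List String :=
  match PySem.List.pop? obj i with
  | some (_, rest) => rest
  | none => obj

def pop_idx (idx : List Int) (objects_to_remove_idx_from : List (List String)) : List (List String) :=
  let idx := idx.reverse
  objects_to_remove_idx_from.map (fun obj => idx.foldl pvPopStep obj)

def shorten_bact_names (bacterias : List String) : List String × List String :=
  let short_bacterias_names := bacterias.foldl (fun acc f =>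
    let parts := (PySem.Str.split? f ";").getD []   -- ";" ≠ "", so split? is always `some`
    acc ++ [PySem.Str.stripChars (pvPartAt parts (pvLoopA parts 1)) " "]) []
  let k_bact_idx := (PySem.List.enumerate short_bacterias_names 0).foldl
    (fun acc p => if p.2 = "k__Bacteria" ∨ p.2 = "Unassigned" then acc ++ [p.1] else acc) []
  if k_bact_idx ≠ [] then
    match pop_idx k_bact_idx [short_bacterias_names, bacterias] with
    | [s, b] => (s, b)
    | _ => (short_bacterias_names, bacterias)   -- unreachable: pop_idx maps over a two-element list
  else (short_bacterias_names, bacterias)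

-- ===== PORT B =====
def pvGood (p : String) : Bool := 5 ≤ PySem.Str.len p && !(p == "Unassigned" || p == "NA")

-- `next((p for p in reversed(parts) if …), parts[0])`; split never returns [], so headD's default is unreachable
def pvPickName (parts : List String) : String :=
  (parts.reverse.find? pvGood).getD (parts.headD "")

def shorten_bact_names_alt (bacterias : List String) : List String × List String :=
  let r := bacterias.foldl (fun (acc : List String × List String) f =>
    let parts := (PySem.Str.split? f ";").getD []
    let name := PySem.Str.stripChars (pvPickName parts) " "
    if name = "k__Bacteria" ∨ name = "Unassigned" then acc
    else (acc.1 ++ [name], acc.2 ++ [f])) ([], [])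
  -- `bacterias[:] = bact` happens only when something was dropped; the returned value is the
  -- (possibly mutated) `bacterias`, which equals `bact` in the first case and r.2 = bacterias otherwise
  if r.2.length ≠ bacterias.length then (r.1, r.2) else (r.1, bacterias)

-- ===== PRECONDITION & SPEC =====
def Spec_shorten_bact_names (bacterias : List String) (out : List String × List String) : Prop := out = shorten_bact_names_alt bacterias
instance (bacterias : List String) (out : List String × List String) : Decidable (Spec_shorten_bact_names bacterias out) := by unfold Spec_shorten_bact_names; infer_instance

-- ===== CLAIM (what is proved, stated in full; the proofs are below) =====
def Claim_equal_shorten_bact_names : Prop := ∀ (bacterias : List String), Dom_shorten_bact_names bacterias → Spec_shorten_bact_names bacterias (shorten_bact_names bacterias)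

-- ===== LEMMAS AND PROOFS =====

-- the per-element shortened (already stripped) name, shared vocabulary of the proofs
def pvName (f : String) : String :=
  PySem.Str.stripChars (pvPickName ((PySem.Str.split? f ";").getD [])) " "

def pvBad (s : String) : Bool := s == "k__Bacteria" || s == "Unassigned"

-- ascending list of indices (as Python ints) of the bad entries, starting at position k
def pvIdxs (k : Int) : List String → List Int
  | [] => []
  | x :: t => (if pvBad x then [k] else []) ++ pvIdxs (k + 1) t

theorem pvGood_iff (x : String) :
    pvGood x = true ↔ ¬ (PySem.Str.len x < 5 ∨ x ∈ ["Unassigned", "NA"]) := by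
  simp [pvGood, not_or]

theorem pvPartAt_eq (parts : List String) (i : Nat) (h1 : 1 ≤ i) (h2 : i ≤ parts.length) :
    pvPartAt parts i = parts[parts.length - i]'(by omega) := by
  rw [pvPartAt, PySem.List.pyGet?_neg_natCast parts i h1 h2]
  simp [List.getElem?_eq_getElem (by omega : parts.length - i < parts.length)]

theorem pvDropRev (parts : List String) (i : Nat) (h1 : 1 ≤ i) (h2 : i ≤ parts.length) :
    parts.reverse.drop (i - 1) = parts[parts.length - i]'(by omega) :: parts.reverse.drop i := by
  rw [List.drop_eq_getElem_cons (by simp; omega)]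
  congr 1
  · rw [List.getElem_reverse]
    congr 1
    omega
  · congr 1
    omega

theorem pvLoopA_eq : ∀ (k : Nat) (parts : List String) (i : Nat), 1 ≤ i → i + k = parts.length →
    pvPartAt parts (pvLoopA parts i)
      = ((parts.reverse.drop (i - 1)).find? pvGood).getD (parts.headD "") := by
  intro k
  induction k with
  | zero =>
    intro parts i h1 h2
    simp only [Nat.add_zero] at h2
    rw [pvDropRev parts i h1 (by omega)]
    by_cases hc : PySem.Str.len (pvPartAt parts i) < 5 ∨ pvPartAt parts i ∈ ["Unassigned", "NA"]
    · rw [pvLoopA, if_pos hc, if_pos (by omega)]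
      have hg : ¬ pvGood (parts[parts.length - i]'(by omega)) = true := by
        rw [pvGood_iff, not_not]
        rw [pvPartAt_eq parts i h1 (by omega)] at hc
        exact hc
      rw [List.find?_cons_of_neg hg, List.drop_of_length_le (by simp; omega), List.find?_nil]
      have hp : parts ≠ [] := by intro h; rw [h] at h2; simp at h2; omega
      cases parts with
      | nil => exact absurd rfl hp
      | cons a t =>
        simp only [Option.getD_none, List.headD_cons]
        rw [show i + 1 - 1 = i from by omega, pvPartAt_eq _ i h1 (by omega)]
        simp [show t.length + 1 - i = 0 from by simp at h2; omega]
    · rw [pvLoopA, if_neg hc]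
      have hg : pvGood (parts[parts.length - i]'(by omega)) = true := by
        rw [pvGood_iff]
        rw [pvPartAt_eq parts i h1 (by omega)] at hc
        exact hc
      rw [List.find?_cons_of_pos hg, Option.getD_some, pvPartAt_eq parts i h1 (by omega)]
  | succ k ih =>
    intro parts i h1 h2
    rw [pvDropRev parts i h1 (by omega)]
    by_cases hc : PySem.Str.len (pvPartAt parts i) < 5 ∨ pvPartAt parts i ∈ ["Unassigned", "NA"]
    · rw [pvLoopA, if_pos hc, if_neg (by omega)]
      have hg : ¬ pvGood (parts[parts.length - i]'(by omega)) = true := by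
        rw [pvGood_iff, not_not]
        rw [pvPartAt_eq parts i h1 (by omega)] at hc
        exact hc
      rw [List.find?_cons_of_neg hg]
      have := ih parts (i + 1) (by omega) (by omega)
      rw [show i + 1 - 1 = i from by omega] at this
      exact this
    · rw [pvLoopA, if_neg hc]
      have hg : pvGood (parts[parts.length - i]'(by omega)) = true := by
        rw [pvGood_iff]
        rw [pvPartAt_eq parts i h1 (by omega)] at hc
        exact hc
      rw [List.find?_cons_of_pos hg, Option.getD_some, pvPartAt_eq parts i h1 (by omega)]

theorem pvName_eq (parts : List String) :
    PySem.Str.stripChars (pvPartAt parts (pvLoopA parts 1)) " "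
      = PySem.Str.stripChars (pvPickName parts) " " := by
  cases hn : parts.length with
  | zero =>
    have hp : parts = [] := List.eq_nil_of_length_eq_zero hn
    subst hp
    simp [pvLoopA, pvPartAt, pvPickName, PySem.List.pyGet?, PySem.List.pyIdx?]
  | succ m =>
    have := pvLoopA_eq m parts 1 (by omega) (by omega)
    rw [show (1 : Nat) - 1 = 0 from rfl, List.drop_zero] at this
    rw [pvPickName, ← this]

theorem pvFoldShort (bs : List String) : ∀ (acc : List String),
    bs.foldl (fun acc f =>
      let parts := (PySem.Str.split? f ";").getD []
      acc ++ [PySem.Str.stripChars (pvPartAt parts (pvLoopA parts 1)) " "]) acc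
      = acc ++ bs.map pvName := by
  induction bs with
  | nil => intro acc; simp
  | cons f t ih =>
    intro acc
    simp only [List.foldl_cons, List.map_cons]
    rw [ih, pvName_eq]
    simp [pvName]

theorem pvFoldIdx (s : List String) : ∀ (k : Int) (acc : List Int),
    (PySem.List.enumerate s k).foldl
      (fun acc p => if p.2 = "k__Bacteria" ∨ p.2 = "Unassigned" then acc ++ [p.1] else acc) acc
      = acc ++ pvIdxs k s := by
  induction s with
  | nil => intros; simp [pvIdxs, PySem.List.enumerate_nil]
  | cons x t ih =>
    intro k acc
    rw [PySem.List.enumerate_cons]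
    simp only [List.foldl_cons]
    by_cases hx : pvBad x = true
    · have hx' : x = "k__Bacteria" ∨ x = "Unassigned" := by
        simpa [pvBad] using hx
      rw [if_pos hx', ih]
      simp [pvIdxs, hx]
    · have hx' : ¬ (x = "k__Bacteria" ∨ x = "Unassigned") := by
        simpa [pvBad] using hx
      rw [if_neg hx', ih]
      simp [pvIdxs, hx]

theorem pvIdxs_shift (s : List String) : ∀ (k : Int), pvIdxs (k + 1) s = (pvIdxs k s).map (· + 1) := by
  induction s with
  | nil => intro k; simp [pvIdxs]
  | cons x t ih =>
    intro k
    simp only [pvIdxs, List.map_append]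
    rw [ih (k + 1), apply_ite (List.map (· + 1))]
    simp

theorem pvIdxs_nonneg (s : List String) : ∀ (k i : Int), i ∈ pvIdxs k s → k ≤ i := by
  induction s with
  | nil => intro k i h; simp [pvIdxs] at h
  | cons x t ih =>
    intro k i h
    simp only [pvIdxs, List.mem_append] at h
    rcases h with h | h
    · split at h <;> simp_all
    · have := ih (k + 1) i h; omega

theorem pvIdxs_nil_iff (s : List String) : ∀ (k : Int), pvIdxs k s = [] ↔ ∀ x ∈ s, pvBad x = false := by
  induction s with
  | nil => intro k; simp [pvIdxs]
  | cons x t ih =>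
    intro k
    simp only [pvIdxs, List.append_eq_nil_iff, List.mem_cons]
    constructor
    · rintro ⟨h1, h2⟩ y hy
      rcases hy with rfl | hy
      · by_contra hb; simp [Bool.not_eq_false] at hb; simp [hb] at h1
      · exact (ih (k + 1)).mp h2 y hy
    · intro h
      refine ⟨by simp [h x (Or.inl rfl)], (ih (k + 1)).mpr fun y hy => h y (Or.inr hy)⟩

theorem pvPop_none (b : List String) (i : Int) (h : 0 ≤ i) (h2 : (b.length : Int) ≤ i) :
    PySem.List.pop? b i = none := by
  simp only [PySem.List.pop?, PySem.List.pyIdx?]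
  rw [if_pos h, if_neg (by omega)]
  rfl

theorem pvPopStep_succ (y : String) (b : List String) (i : Int) (h : 0 ≤ i) :
    pvPopStep (y :: b) (i + 1) = y :: pvPopStep b i := by
  obtain ⟨m, rfl⟩ : ∃ m : Nat, (m : Int) = i := ⟨i.toNat, Int.toNat_of_nonneg h⟩
  by_cases hm : m < b.length
  · have h1 : ((m : Int) + 1) = ((m + 1 : Nat) : Int) := by push_cast; ring
    rw [pvPopStep, pvPopStep, h1,
        PySem.List.pop?_natCast (y :: b) (m + 1) (by simpa using Nat.succ_lt_succ hm),
        PySem.List.pop?_natCast b m hm]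
    simp
  · have e1 : PySem.List.pop? b (m : Int) = none := pvPop_none _ _ h (by omega)
    have e2 : PySem.List.pop? (y :: b) ((m : Int) + 1) = none :=
      pvPop_none _ _ (by omega) (by simp; omega)
    rw [pvPopStep, pvPopStep, e1, e2]

theorem pvPopShift (idx : List Int) : (∀ i ∈ idx, 0 ≤ i) → ∀ (y : String) (b : List String),
    (idx.map (· + 1)).foldl pvPopStep (y :: b) = y :: idx.foldl pvPopStep b := by
  induction idx with
  | nil => intros; simp
  | cons i t ih =>
    intro h y b
    simp only [List.map_cons, List.foldl_cons]
    rw [pvPopStep_succ y b i (h i (by simp)), ih (fun j hj => h j (by simp [hj]))]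

theorem pvPopL (s : List String) : ∀ (b : List String), b.length = s.length →
    ((pvIdxs 0 s).reverse).foldl pvPopStep b
      = ((s.zip b).filter (fun p => !pvBad p.1)).map (·.2) := by
  induction s with
  | nil =>
    intro b hb
    have hb0 : b = [] := List.eq_nil_of_length_eq_zero (by simpa using hb)
    subst hb0
    simp [pvIdxs]
  | cons x s' ih =>
    intro b hb
    cases b with
    | nil => simp at hb
    | cons y b' =>
      have hb' : b'.length = s'.length := by simpa using hb
      have h1 : pvIdxs 0 (x :: s') = (if pvBad x then [(0 : Int)] else []) ++ (pvIdxs 0 s').map (· + 1) := by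
        rw [pvIdxs]
        rw [show (0 : Int) + 1 = 1 from rfl] at *
        rw [show pvIdxs 1 s' = (pvIdxs 0 s').map (· + 1) from by
          have := pvIdxs_shift s' 0; simpa using this]
      rw [h1, List.reverse_append, ← List.map_reverse, List.foldl_append,
          pvPopShift _ (fun i hi => by
            rw [List.mem_reverse] at hi
            exact pvIdxs_nonneg s' 0 i hi), ih b' hb']
      by_cases hx : pvBad x = true
      · simp only [hx, if_pos, List.reverse_cons, List.reverse_nil, List.nil_append,
          List.foldl_cons, List.foldl_nil]
        rw [show pvPopStep (y :: ((List.filter (fun p => !pvBad p.1) (s'.zip b')).map (·.2))) 0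
              = (List.filter (fun p => !pvBad p.1) (s'.zip b')).map (·.2) from by
          rw [pvPopStep, PySem.List.pop?_zero_cons]]
        simp [List.zip_cons_cons, hx]
      · simp only [hx]
        simp [List.zip_cons_cons, hx]

theorem pvFoldB (bs : List String) : ∀ (acc : List String × List String),
    bs.foldl (fun (acc : List String × List String) f =>
      let parts := (PySem.Str.split? f ";").getD []
      let name := PySem.Str.stripChars (pvPickName parts) " "
      if name = "k__Bacteria" ∨ name = "Unassigned" then acc
      else (acc.1 ++ [name], acc.2 ++ [f])) acc
      = (acc.1 ++ (bs.filter (fun f => !pvBad (pvName f))).map pvName,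
         acc.2 ++ bs.filter (fun f => !pvBad (pvName f))) := by
  induction bs with
  | nil => intro acc; simp
  | cons f t ih =>
    intro acc
    simp only [List.foldl_cons]
    by_cases hf : pvBad (pvName f) = true
    · have hf' : pvName f = "k__Bacteria" ∨ pvName f = "Unassigned" := by
        simpa [pvBad] using hf
      rw [show (if PySem.Str.stripChars (pvPickName ((PySem.Str.split? f ";").getD [])) " " = "k__Bacteria" ∨
            PySem.Str.stripChars (pvPickName ((PySem.Str.split? f ";").getD [])) " " = "Unassigned" then acc
            else (acc.1 ++ [PySem.Str.stripChars (pvPickName ((PySem.Str.split? f ";").getD [])) " "], acc.2 ++ [f])) = acc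
          from if_pos (by simpa [pvName] using hf'), ih]
      simp [hf]
    · have hf' : ¬ (pvName f = "k__Bacteria" ∨ pvName f = "Unassigned") := by
        simpa [pvBad] using hf
      rw [show (if PySem.Str.stripChars (pvPickName ((PySem.Str.split? f ";").getD [])) " " = "k__Bacteria" ∨
            PySem.Str.stripChars (pvPickName ((PySem.Str.split? f ";").getD [])) " " = "Unassigned" then acc
            else (acc.1 ++ [PySem.Str.stripChars (pvPickName ((PySem.Str.split? f ";").getD [])) " "], acc.2 ++ [f]))
            = (acc.1 ++ [pvName f], acc.2 ++ [f])
          from if_neg (by simpa [pvName] using hf'), ih]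
      have hf2 : pvBad (PySem.Str.stripChars (pvPickName ((PySem.Str.split? f ";").getD [])) " ") = false := by
        simpa [pvName] using hf
      simp [hf2, pvName]

theorem pvZipMapSelf (g : String → String) (l : List String) :
    (l.map g).zip l = l.map (fun f => (g f, f)) := by
  induction l with
  | nil => simp
  | cons x t ih => simp [List.zip_cons_cons, ih]

theorem pvPopS (s : List String) :
    ((pvIdxs 0 s).reverse).foldl pvPopStep s = s.filter (fun x => !pvBad x) := by
  rw [pvPopL s s rfl, show s.zip s = s.map (fun x => (x, x)) from by
    have := pvZipMapSelf id s; simpa using this]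
  rw [List.filter_map]
  simp [Function.comp_def]

theorem pvPopB (b : List String) :
    ((pvIdxs 0 (b.map pvName)).reverse).foldl pvPopStep b = b.filter (fun f => !pvBad (pvName f)) := by
  rw [pvPopL _ b (by simp), pvZipMapSelf, List.filter_map]
  simp [Function.comp_def]

theorem pvFilterS (b : List String) :
    (b.map pvName).filter (fun x => !pvBad x) = (b.filter (fun f => !pvBad (pvName f))).map pvName := by
  rw [List.filter_map]
  simp [Function.comp_def]

-- ===== VERDICT (by name: the statement is the Claim_ definition above) =====
theorem shorten_bact_names_spec : Claim_equal_shorten_bact_names := by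
  unfold Claim_equal_shorten_bact_names
  intro bacterias _
  unfold Spec_shorten_bact_names
  show shorten_bact_names bacterias = shorten_bact_names_alt bacterias
  simp only [shorten_bact_names, shorten_bact_names_alt, pop_idx]
  rw [pvFoldShort]
  simp only [List.nil_append]
  rw [pvFoldIdx]
  simp only [List.nil_append]
  rw [pvFoldB]
  simp only [List.nil_append, List.map_cons, List.map_nil]
  rw [pvPopS, pvPopB, pvFilterS]
  by_cases hid : pvIdxs 0 (bacterias.map pvName) = []
  · rw [if_neg (by simpa using hid)]
    have hall : ∀ f ∈ bacterias, pvBad (pvName f) = false := fun f hf =>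
      (pvIdxs_nil_iff _ 0).mp hid (pvName f) (List.mem_map_of_mem hf)
    have hFb : bacterias.filter (fun f => !pvBad (pvName f)) = bacterias :=
      List.filter_eq_self.mpr (fun a ha => by simp [hall a ha])
    rw [hFb, if_neg (by simp)]
  · rw [if_pos hid]
    by_cases hlen : (bacterias.filter (fun f => !pvBad (pvName f))).length = bacterias.length
    · have hFb : bacterias.filter (fun f => !pvBad (pvName f)) = bacterias :=
        List.filter_sublist.eq_of_length hlen
      rw [hFb, if_neg (by simp)]
    · rw [if_pos hlen]
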